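-- pv_equiv track=rewrite | github.com/Shivansh1146/medisence-ai | backend/app.py | get_doctors_by_symptoms
-- ===== SOURCE A (Python) =====
-- def get_doctors_by_symptoms(symptoms):
--     """Find relevant doctors based on symptoms"""
--     # Simplified matching - in real implementation, use symptom-specialty mapping
--     if any(s in ["cough", "fever", "cold"] for s in symptoms):
--         return ["General Physician", "Pulmonologist"]
--     elif any(s in ["pain", "ache", "injury"] for s in symptoms):
--         return ["Orthopedic", "General Physician"]
--     elif any(s in ["skin", "rash", "itch"] for s in symptoms):
--         return ["Dermatologist"]
--     return ["General Physician"]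
-- ===== SOURCE B (Python) =====
-- def get_doctors_by_symptoms(symptoms):
--     """Find relevant doctors based on symptoms (single pass, priority table)"""
--     priority = {"cough": 0, "fever": 0, "cold": 0,
--                 "pain": 1, "ache": 1, "injury": 1,
--                 "skin": 2, "rash": 2, "itch": 2}
--     results = [["General Physician", "Pulmonologist"],
--                ["Orthopedic", "General Physician"],
--                ["Dermatologist"],
--                ["General Physician"]]
--     best = 3
--     for s in symptoms:
--         best = min(best, priority.get(s, 3))
--     return results[best]
-- ===== Notes on version B (the rewrite author's own statement) =====
-- stated objective: alternative
-- what changed: Replaces A's three separate any-scans over the symptom list (one per if/elif branch) with a single pass that folds a minimum priority looked up in a keyword->priority dict, then indexes a result table once.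
import Mathlib
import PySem

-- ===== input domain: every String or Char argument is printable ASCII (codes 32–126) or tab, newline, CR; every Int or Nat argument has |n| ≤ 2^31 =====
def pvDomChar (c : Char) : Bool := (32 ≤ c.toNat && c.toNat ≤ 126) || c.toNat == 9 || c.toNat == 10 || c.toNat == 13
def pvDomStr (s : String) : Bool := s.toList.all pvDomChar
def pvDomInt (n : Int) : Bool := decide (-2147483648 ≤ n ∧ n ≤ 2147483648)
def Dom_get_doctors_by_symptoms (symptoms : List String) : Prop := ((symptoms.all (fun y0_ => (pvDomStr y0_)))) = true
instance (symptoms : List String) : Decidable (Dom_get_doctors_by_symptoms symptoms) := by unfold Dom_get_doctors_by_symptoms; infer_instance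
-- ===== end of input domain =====

-- B replaces A's per-branch any-scans with one fold of a minimum dict-looked-up priority; same values, alternative decomposition.


-- ===== PORT A =====
def get_doctors_by_symptoms (symptoms : List String) : List String :=
  if symptoms.any (fun s => ["cough", "fever", "cold"].contains s) then
    ["General Physician", "Pulmonologist"]
  else if symptoms.any (fun s => ["pain", "ache", "injury"].contains s) then
    ["Orthopedic", "General Physician"]
  else if symptoms.any (fun s => ["skin", "rash", "itch"].contains s) then
    ["Dermatologist"]
  else
    ["General Physician"]

-- ===== PORT B =====
def pvPriority : PySem.Dict String Int :=
  PySem.Dict.ofList [("cough", 0), ("fever", 0), ("cold", 0),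
                     ("pain", 1), ("ache", 1), ("injury", 1),
                     ("skin", 2), ("rash", 2), ("itch", 2)]

def pvResults : List (List String) :=
  [["General Physician", "Pulmonologist"],
   ["Orthopedic", "General Physician"],
   ["Dermatologist"],
   ["General Physician"]]

def get_doctors_by_symptoms_alt (symptoms : List String) : List String :=
  let best : Int := symptoms.foldl (fun b s => min b (pvPriority.getD s 3)) 3
  -- results[best]: best is always one of 0,1,2,3, so this index is in range
  (PySem.List.pyGet? pvResults best).getD []

-- ===== PRECONDITION & SPEC =====
def Spec_get_doctors_by_symptoms (symptoms : List String) (out : List String) : Prop := out = get_doctors_by_symptoms_alt symptoms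
instance (symptoms : List String) (out : List String) : Decidable (Spec_get_doctors_by_symptoms symptoms out) := by unfold Spec_get_doctors_by_symptoms; infer_instance

-- ===== CLAIM (what is proved, stated in full; the proofs are below) =====
def Claim_equal_get_doctors_by_symptoms : Prop := ∀ (symptoms : List String), Dom_get_doctors_by_symptoms symptoms → Spec_get_doctors_by_symptoms symptoms (get_doctors_by_symptoms symptoms)

-- ===== LEMMAS AND PROOFS =====

/-- The priority lookup as a plain if-chain. -/
def prio (s : String) : Int :=
  if s = "cough" ∨ s = "fever" ∨ s = "cold" then 0
  else if s = "pain" ∨ s = "ache" ∨ s = "injury" then 1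
  else if s = "skin" ∨ s = "rash" ∨ s = "itch" then 2
  else 3

theorem pvPriority_items : pvPriority.items =
    [("cough", 0), ("fever", 0), ("cold", 0), ("pain", 1), ("ache", 1), ("injury", 1),
     ("skin", 2), ("rash", 2), ("itch", 2)] := by decide

theorem getD_pvPriority (s : String) : pvPriority.getD s 3 = prio s := by
  by_cases h : s = "cough" ∨ s = "fever" ∨ s = "cold" ∨ s = "pain" ∨ s = "ache" ∨
      s = "injury" ∨ s = "skin" ∨ s = "rash" ∨ s = "itch"
  · rcases h with h | h | h | h | h | h | h | h | h <;> subst h <;> decide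
  · push_neg at h
    obtain ⟨a1, a2, a3, b1, b2, b3, c1, c2, c3⟩ := h
    have hf : pvPriority.items.find? (fun p => p.1 == s) = none := by
      rw [List.find?_eq_none]
      intro p hp
      rw [pvPriority_items] at hp
      fin_cases hp <;> simp only [beq_iff_eq]
      exacts [Ne.symm a1, Ne.symm a2, Ne.symm a3, Ne.symm b1, Ne.symm b2, Ne.symm b3,
        Ne.symm c1, Ne.symm c2, Ne.symm c3]
    have hp : prio s = 3 := by
      unfold prio; split_ifs with g1 g2 g3 <;> simp_all
    simp [PySem.Dict.getD, PySem.Dict.get?, hf, hp]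

theorem prio_le (s : String) : prio s ≤ 3 := by
  unfold prio; split_ifs <;> omega

theorem prio_nonneg (s : String) : 0 ≤ prio s := by
  unfold prio; split_ifs <;> omega

theorem foldl_min_prio (l : List String) (b : Int) (hb : b ≤ 3) :
    l.foldl (fun b s => min b (prio s)) b = min b (l.foldl (fun b s => min b (prio s)) 3) := by
  induction l generalizing b with
  | nil => simp [List.foldl]; omega
  | cons s t ih =>
    have hs := prio_le s
    simp only [List.foldl]
    rw [ih (min b (prio s)) (by omega), ih (min 3 (prio s)) (by omega)]
    have h3 : min (3 : Int) (prio s) = prio s := by omega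
    rw [h3]
    omega

/-- The folded minimum, characterised by A's three any-tests. -/
theorem foldl_min_eq (l : List String) :
    l.foldl (fun b s => min b (prio s)) 3 =
      if l.any (fun s => prio s = 0) then 0
      else if l.any (fun s => prio s = 1) then 1
      else if l.any (fun s => prio s = 2) then 2
      else 3 := by
  induction l with
  | nil => simp
  | cons s t ih =>
    have hs := prio_le s
    have hs0 := prio_nonneg s
    have ht3 : t.foldl (fun b s => min b (prio s)) 3 ≤ 3 := by
      have := foldl_min_prio t 3 (by norm_num); omega
    simp only [List.foldl, List.any_cons]
    rw [foldl_min_prio _ _ (by omega), ih]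
    have h3 : min (3 : Int) (prio s) = prio s := by omega
    rw [h3]
    by_cases h0 : prio s = 0 <;> by_cases h1 : prio s = 1 <;> by_cases h2 : prio s = 2 <;>
      simp [h0, h1, h2] <;> split_ifs <;> omega

theorem any_ext {p q : String → Bool} (h : ∀ s, p s = q s) (l : List String) :
    l.any p = l.any q := by
  induction l <;> simp_all

theorem prio_zero (s : String) :
    (decide (prio s = 0)) = ["cough", "fever", "cold"].contains s := by
  by_cases h : s = "cough" ∨ s = "fever" ∨ s = "cold"
  · rcases h with h | h | h <;> subst h <;> decide
  · push_neg at h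
    obtain ⟨h1, h2, h3⟩ := h
    have hp : prio s ≠ 0 := by unfold prio; split_ifs with g1 g2 g3 <;> simp_all
    simp [hp]
    exact ⟨h1, h2, h3⟩

theorem prio_one (s : String) :
    (decide (prio s = 1)) = ["pain", "ache", "injury"].contains s := by
  by_cases h : s = "pain" ∨ s = "ache" ∨ s = "injury"
  · rcases h with h | h | h <;> subst h <;> decide
  · push_neg at h
    obtain ⟨h1, h2, h3⟩ := h
    have hp : prio s ≠ 1 := by unfold prio; split_ifs with g1 g2 g3 <;> simp_all
    simp [hp]
    exact ⟨h1, h2, h3⟩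

theorem prio_two (s : String) :
    (decide (prio s = 2)) = ["skin", "rash", "itch"].contains s := by
  by_cases h : s = "skin" ∨ s = "rash" ∨ s = "itch"
  · rcases h with h | h | h <;> subst h <;> decide
  · push_neg at h
    obtain ⟨h1, h2, h3⟩ := h
    have hp : prio s ≠ 2 := by unfold prio; split_ifs with g1 g2 g3 <;> simp_all
    simp [hp]
    exact ⟨h1, h2, h3⟩

-- ===== VERDICT (by name: the statement is the Claim_ definition above) =====
theorem get_doctors_by_symptoms_spec : Claim_equal_get_doctors_by_symptoms := by
  intro symptoms _
  unfold Spec_get_doctors_by_symptoms get_doctors_by_symptoms get_doctors_by_symptoms_alt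
  have hfold : (fun (b : Int) s => min b (pvPriority.getD s 3)) = (fun b s => min b (prio s)) := by
    funext b s; rw [getD_pvPriority]
  rw [hfold, foldl_min_eq,
    any_ext prio_zero symptoms, any_ext prio_one symptoms, any_ext prio_two symptoms]
  split_ifs <;> rfl
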